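-- pv_equiv track=rewrite | github.com/neuroethology/BKinD | dataloader/simple_human36m_dataset.py | assign_classes
-- ===== SOURCE A (Python) =====
-- def assign_classes(actions):
--     classes = [x for x in actions]
--     class_to_idx = {}
--     cnt = 0
--     for i in range(len(classes)):
--         if classes[i] not in class_to_idx.keys():
--             class_to_idx[classes[i]] = cnt
--             cnt += 1
--
--     return classes, class_to_idx
-- ===== SOURCE B (Python) =====
-- def assign_classes(actions):
--     classes = list(actions)
--     order = sorted(set(classes), key=classes.index)
--     class_to_idx = {a: i for i, a in enumerate(order)}
--     return classes, class_to_idx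
-- ===== Notes on version B (the rewrite author's own statement) =====
-- stated objective: alternative
-- what changed: Instead of A's single ordered pass with membership tests and a manual counter, B takes the unordered set of actions and reconstructs first-occurrence order by sorting the distinct actions by classes.index, then enumerates the sorted list.
import Mathlib
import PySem

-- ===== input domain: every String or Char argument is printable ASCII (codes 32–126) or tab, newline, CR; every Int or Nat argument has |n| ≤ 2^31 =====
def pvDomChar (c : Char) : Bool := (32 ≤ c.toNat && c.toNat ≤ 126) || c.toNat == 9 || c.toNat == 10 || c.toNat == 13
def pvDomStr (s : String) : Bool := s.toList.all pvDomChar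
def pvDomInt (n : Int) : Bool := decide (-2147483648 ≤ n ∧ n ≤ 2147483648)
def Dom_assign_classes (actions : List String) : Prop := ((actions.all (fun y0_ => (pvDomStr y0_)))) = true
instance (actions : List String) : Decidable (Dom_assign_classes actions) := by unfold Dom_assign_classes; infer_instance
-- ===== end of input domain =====

-- B rebuilds first-occurrence order by sorting the SET of actions by classes.index, instead of A's ordered counter loop (alternative; same result).

-- ===== PORT A =====
-- A: classes = [x for x in actions]; loop i in range(len(classes)) building class_to_idx with a manual counter.
def assign_classes (actions : List String) : List String × (List (String × Int)) :=
  let classes := actions.map (fun x => x)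
  let st := (PySem.List.pyRange 0 (classes.length : Int) 1).foldl
      (fun (s : PySem.Dict String Int × Int) i =>
        if !(s.1.contains (PySem.List.pyGetD classes i "")) then
          (s.1.insert (PySem.List.pyGetD classes i "") s.2, s.2 + 1)
        else s)
      (PySem.Dict.empty, 0)
  (classes, st.1.items)

-- ===== PORT B =====
-- B: classes = list(actions); order = sorted(set(classes), key=classes.index); enumerate it.
def assign_classes_alt (actions : List String) : List String × (List (String × Int)) :=
  let classes := actions
  let order := PySem.List.sorted (PySem.Set.ofList classes)
      (fun a => (PySem.List.index? classes a).getD 0) false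
  let class_to_idx := (PySem.List.enumerate order 0).map (fun p => (p.2, p.1))
  (classes, class_to_idx)

-- ===== PRECONDITION & SPEC =====
def Spec_assign_classes (actions : List String) (out : List String × (List (String × Int))) : Prop := out = assign_classes_alt actions
instance (actions : List String) (out : List String × (List (String × Int))) : Decidable (Spec_assign_classes actions out) := by unfold Spec_assign_classes; infer_instance

-- ===== CLAIM (what is proved, stated in full; the proofs are below) =====
def Claim_equal_assign_classes : Prop := ∀ (actions : List String), Dom_assign_classes actions → Spec_assign_classes actions (assign_classes actions)

-- ===== LEMMAS AND PROOFS =====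

-- the dictionary A's loop has built after seeing exactly the distinct prefix u
def mkD (u : List String) : PySem.Dict String Int :=
  PySem.Dict.mk ((PySem.List.enumerate u 0).map (fun p => (p.2, p.1)))

theorem keys_mkD (u : List String) : (mkD u).keys = u := by
  simp [mkD, PySem.Dict.keys, Function.comp_def]

theorem contains_mkD (u : List String) (x : String) :
    (mkD u).contains x = decide (x ∈ u) := by
  rw [PySem.Dict.contains_eq_decide_mem_keys, keys_mkD]

theorem mkD_append (u : List String) (x : String) (hx : x ∉ u) :
    mkD (u ++ [x]) = (mkD u).insert x (u.length : Int) := by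
  apply PySem.Dict.ext
  rw [PySem.Dict.items_insert_of_not_contains]
  · simp [mkD, PySem.List.enumerate_append, PySem.List.enumerate_cons,
      PySem.List.enumerate_nil]
  · rw [contains_mkD]; simp [hx]

theorem loopA (l u : List String) (hu : u.Nodup) :
    l.foldl
      (fun (s : PySem.Dict String Int × Int) c =>
        if !(s.1.contains c) then (s.1.insert c s.2, s.2 + 1) else s)
      (mkD u, (u.length : Int))
    = (mkD (PySem.Set.update u l), ((PySem.Set.update u l).length : Int)) := by
  induction l generalizing u with
  | nil => simp [PySem.Set.update]
  | cons x l ih =>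
    rw [List.foldl_cons]
    have hupd : PySem.Set.update u (x :: l) = PySem.Set.update (PySem.Set.add u x) l := by
      simp [PySem.Set.update]
    rw [hupd]
    by_cases hx : x ∈ u
    · have hc : (mkD u).contains x = true := by rw [contains_mkD]; simp [hx]
      have ha : PySem.Set.add u x = u := by
        simp [PySem.Set.add, PySem.Set.contains, hx]
      rw [ha]
      simpa [hc] using ih u hu
    · have hc : (mkD u).contains x = false := by rw [contains_mkD]; simp [hx]
      have ha : PySem.Set.add u x = u ++ [x] := by
        simp [PySem.Set.add, PySem.Set.contains, hx]
      rw [ha]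
      have hnd : (u ++ [x]).Nodup := by
        simp only [List.nodup_append, hu, List.nodup_singleton, true_and]
        intro a ha b hb he
        simp only [List.mem_singleton] at hb
        exact hx (by rw [← hb, ← he]; exact ha)
      have := ih (u ++ [x]) hnd
      simp only [hc, Bool.not_false, if_true] at *
      rw [← mkD_append u x hx] at *
      simpa using this

-- first-occurrence indices are strictly increasing along the ordered dedup
theorem pairwise_index_dedup (xs : List String) :
    (PySem.List.dedup xs).Pairwise
      (fun a b => ((PySem.List.index? xs a).getD 0 : Nat) < (PySem.List.index? xs b).getD 0) := by
  induction xs using List.reverseRecOn with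
  | nil => simp [PySem.List.dedup]
  | append_singleton xs x ih =>
    have hded : PySem.List.dedup (xs ++ [x]) = PySem.Set.add (PySem.List.dedup xs) x := by
      rw [PySem.List.dedup_eq_ofList, PySem.List.dedup_eq_ofList,
        PySem.Set.ofList_eq_foldl, PySem.Set.ofList_eq_foldl, List.foldl_append,
        List.foldl_cons, List.foldl_nil]
    have hkey : ∀ a ∈ PySem.List.dedup xs,
        ((PySem.List.index? (xs ++ [x]) a).getD 0 : Nat) = (PySem.List.index? xs a).getD 0 := by
      intro a ha
      rw [PySem.List.index?_append_of_mem [x] (by simpa [PySem.List.mem_dedup] using ha)]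
    rw [hded]
    by_cases hx : x ∈ PySem.List.dedup xs
    · have hx' : x ∈ xs := by simpa [PySem.List.mem_dedup] using hx
      have : PySem.Set.add (PySem.List.dedup xs) x = PySem.List.dedup xs := by
        simp [PySem.Set.add, PySem.Set.contains, hx']
      rw [this]
      exact List.Pairwise.imp_of_mem (fun {a b} ha hb h => by rw [hkey a ha, hkey b hb]; exact h) ih
    · have hx' : x ∉ xs := by simpa [PySem.List.mem_dedup] using hx
      have : PySem.Set.add (PySem.List.dedup xs) x = PySem.List.dedup xs ++ [x] := by
        simp [PySem.Set.add, PySem.Set.contains, hx']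
      rw [this, List.pairwise_append]
      refine ⟨List.Pairwise.imp_of_mem (fun {a b} ha hb h => by rw [hkey a ha, hkey b hb]; exact h) ih,
        by simp, ?_⟩
      intro a ha b hb
      simp only [List.mem_singleton] at hb
      have hax : a ∈ xs := by simpa [PySem.List.mem_dedup] using ha
      have h1 : PySem.List.index? (xs ++ [x]) x = some xs.length :=
        PySem.List.index?_append_singleton_self xs x hx'
      show ((PySem.List.index? (xs ++ [x]) a).getD 0 : Nat) < (PySem.List.index? (xs ++ [x]) b).getD 0
      rw [hb, hkey a ha, h1]
      have h2 : ∃ k, PySem.List.index? xs a = some k ∧ k < xs.length := by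
        rcases Option.isSome_iff_exists.mp ((PySem.List.index?_isSome_iff xs a).mpr hax) with ⟨k, hk⟩
        rcases PySem.List.getElem_of_index?_eq_some hk with ⟨hlt, _⟩
        exact ⟨k, hk, hlt⟩
      rcases h2 with ⟨k, hk, hlt⟩
      rw [hk]
      simpa using hlt

-- B's sort by first-occurrence index is exactly the ordered dedup
theorem sorted_eq_dedup (xs : List String) :
    PySem.List.sorted (PySem.Set.ofList xs)
      (fun a => (PySem.List.index? xs a).getD 0) false = PySem.List.dedup xs := by
  apply PySem.List.sorted_eq_of_perm_of_pairwise_lt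
  · rw [← PySem.List.dedup_eq_ofList]
  · exact pairwise_index_dedup xs

-- ===== VERDICT (by name: the statement is the Claim_ definition above) =====
theorem assign_classes_spec : Claim_equal_assign_classes := by
  intro actions _
  show _ = _
  unfold assign_classes assign_classes_alt
  simp only [List.map_id_fun', id]
  rw [sorted_eq_dedup]
  rw [show ((actions.length : Int)) = PySem.List.len actions from rfl]
  rw [PySem.List.foldl_pyRange_pyGetD (a := 0) (xs := actions) (d := "")
    (f := fun (s : PySem.Dict String Int × Int) c =>
      if !(s.1.contains c) then (s.1.insert c s.2, s.2 + 1) else s)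
    (init := (PySem.Dict.empty, 0)) (by omega)]
  have h0 : (PySem.Dict.empty : PySem.Dict String Int) = mkD [] := by
    simp [mkD, PySem.List.enumerate_nil, PySem.Dict.empty]
  rw [Int.toNat_zero, List.drop_zero, h0,
    show ((0 : Int) = (([] : List String).length : Int)) from rfl,
    loopA actions [] List.nodup_nil]
  simp [mkD, PySem.Set.update, PySem.Set.ofList_eq_foldl, PySem.List.dedup_eq_ofList]
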